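-- pv_equiv track=rewrite | github.com/liu-bluesky/AI-Native | web-admin/api/services/dynamic_mcp_external_tools.py | _tool_token
-- ===== SOURCE A (Python) =====
-- def _tool_token(value: str) -> str:
--     text = "".join(ch if ch.isalnum() else "_" for ch in str(value or "").strip().lower())
--     text = "_".join(part for part in text.split("_") if part)
--     if not text:
--         return "tool"
--     if text[0].isdigit():
--         return f"t_{text}"
--     return text
-- ===== SOURCE B (Python) =====
-- def _tool_token(value: str) -> str:
--     out = []
--     for ch in str(value or "").strip().lower():
--         if ch.isalnum():
--             out.append(ch)
--         elif out and out[-1] != "_":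
--             out.append("_")
--     if out and out[-1] == "_":
--         out.pop()
--     if not out:
--         return "tool"
--     text = "".join(out)
--     if text[0].isdigit():
--         return f"t_{text}"
--     return text
-- ===== Notes on version B (the rewrite author's own statement) =====
-- stated objective: alternative
-- what changed: A maps every char (comprehension pass 1) and then collapses/strips underscores via split/join on underscores (pass 2); B builds the token in one left-to-right pass with an accumulator that emits an underscore only when the output is non-empty and does not already end in one, then pops a trailing underscore.
import Mathlib
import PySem

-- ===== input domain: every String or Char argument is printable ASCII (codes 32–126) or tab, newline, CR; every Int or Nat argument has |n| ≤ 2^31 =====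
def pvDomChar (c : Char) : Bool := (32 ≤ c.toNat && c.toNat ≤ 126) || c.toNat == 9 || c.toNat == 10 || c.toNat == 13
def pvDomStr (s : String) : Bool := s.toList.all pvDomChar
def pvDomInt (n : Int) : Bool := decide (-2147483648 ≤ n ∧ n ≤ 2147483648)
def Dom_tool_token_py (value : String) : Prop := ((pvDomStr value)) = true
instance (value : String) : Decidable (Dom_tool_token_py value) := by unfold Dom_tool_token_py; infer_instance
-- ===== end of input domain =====

-- B fuses A's two passes (char-map comprehension, then split/join underscore collapse) into one
-- left-to-right accumulator pass; same return value, no speed claim (objective: alternative).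

-- ===== PORT A =====
def tool_token_py (value : String) : String :=
  -- str(value or "")
  let base := if value = "" then "" else value
  -- for ch in ….strip().lower(): ch if ch.isalnum() else "_"
  let mapped := (PySem.Chars.lower (PySem.Chars.strip base.toList)).map
      (fun ch => if PySem.Chars.isalnum ch then ch else '_')
  -- "_".join(part for part in text.split("_") if part)
  let text := PySem.Chars.join ['_'] ((PySem.Chars.splitOn mapped ['_']).filter (fun p => !p.isEmpty))
  if text.isEmpty then "tool"
  else if PySem.Chars.isdigit text.headI then String.mk ('t' :: '_' :: text)
  else String.mk text

-- ===== PORT B =====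
def tool_token_py_alt (value : String) : String :=
  let base := if value = "" then "" else value
  let cs := PySem.Chars.lower (PySem.Chars.strip base.toList)
  -- single pass: append alnum chars; otherwise a '_' only if out is non-empty and out[-1] != '_'
  let out := cs.foldl (fun acc ch =>
      if PySem.Chars.isalnum ch then acc ++ [ch]
      else if acc ≠ [] ∧ PySem.List.pyGet? acc (-1) ≠ some '_' then acc ++ ['_'] else acc) []
  -- if out and out[-1] == "_": out.pop()
  let out2 := if out ≠ [] ∧ PySem.List.pyGet? out (-1) = some '_' then out.dropLast else out
  if out2.isEmpty then "tool"
  else if PySem.Chars.isdigit out2.headI then String.mk ('t' :: '_' :: out2)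
  else String.mk out2

-- ===== PRECONDITION & SPEC =====
def Spec_tool_token_py (value : String) (out : String) : Prop := out = tool_token_py_alt value
instance (value : String) (out : String) : Decidable (Spec_tool_token_py value out) := by unfold Spec_tool_token_py; infer_instance

-- ===== CLAIM (what is proved, stated in full; the proofs are below) =====
def Claim_equal_tool_token_py : Prop := ∀ (value : String), Dom_tool_token_py value → Spec_tool_token_py value (tool_token_py value)

-- ===== LEMMAS AND PROOFS =====

def pvMapC (c : Char) : Char := if PySem.Chars.isalnum c then c else '_'
mutual
def pvM : List Char → List Char
  | [] => []
  | c :: t => if c = '_' then pvM t else c :: pvM' t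
def pvM' : List Char → List Char
  | [] => []
  | c :: t => if c = '_' then (match pvM t with | [] => [] | r => '_' :: r) else c :: pvM' t
end
def pvG : Bool → List Char → List Char
  | _, [] => []
  | s, c :: t =>
      if PySem.Chars.isalnum c then c :: pvG true t
      else if s then '_' :: pvG false t else pvG false t
def pvStripT (l : List Char) : List Char := if l.getLast? = some '_' then l.dropLast else l
lemma pv_pyGet_neg_one (l : List Char) : PySem.List.pyGet? l (-1) = l.getLast? := by
  cases l with
  | nil => rfl
  | cons a t => simp [PySem.List.pyGet?, PySem.List.pyIdx?, List.getLast?_eq_getElem?]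
lemma pv_alnum_ne (c : Char) (h : PySem.Chars.isalnum c = true) : c ≠ '_' := by
  intro he; rw [he] at h; exact absurd h (by decide)


def pvSp : List Char → List (List Char)
  | [] => [[]]
  | c :: t =>
      if c = '_' then [] :: pvSp t
      else match pvSp t with
        | [] => [[c]]
        | p :: ps => (c :: p) :: ps

lemma pvSp_ne (l : List Char) : pvSp l ≠ [] := by
  cases l with
  | nil => simp [pvSp]
  | cons c t => simp only [pvSp]; split; · simp
                split <;> simp

lemma pv_go_spec (fuel : Nat) : ∀ (l cur : List Char) (acc : List (List Char)), l.length < fuel →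
    PySem.Chars.splitOn.go ['_'] fuel l cur acc
      = acc.reverse ++ ((cur.reverse ++ (pvSp l).headI) :: (pvSp l).tail) := by
  induction fuel with
  | zero => intro l cur acc h; omega
  | succ n ih =>
    intro l cur acc h
    cases l with
    | nil => simp [PySem.Chars.splitOn.go, pvSp]
    | cons c rest =>
      rw [PySem.Chars.splitOn.go]
      by_cases hc : c = '_'
      · subst hc
        have hpre : List.isPrefixOf ['_'] ('_' :: rest) = true := by simp [List.isPrefixOf]
        rw [if_pos hpre]
        have hdrop : List.drop ['_'].length ('_' :: rest) = rest := by simp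
        rw [hdrop, ih rest [] (cur.reverse :: acc) (by simp at h ⊢; omega)]
        have hne := pvSp_ne rest
        simp [pvSp]
        cases hsp : pvSp rest with
        | nil => exact absurd hsp hne
        | cons p ps => simp
      · have hpre : List.isPrefixOf ['_'] (c :: rest) = false := by
          simp [List.isPrefixOf]; exact fun hh => absurd hh.symm hc
        rw [if_neg (by simp [hpre])]
        rw [ih rest (c :: cur) acc (by simp at h ⊢; omega)]
        cases hsp : pvSp rest with
        | nil => exact absurd hsp (pvSp_ne rest)
        | cons p ps => simp [pvSp, hc, hsp]

lemma pv_cons_headI_tail {α : Type} [Inhabited α] {l : List α} (h : l ≠ []) : l.headI :: l.tail = l := by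
  cases l with
  | nil => exact absurd rfl h
  | cons a t => rfl

lemma pv_splitOn_eq (m : List Char) : PySem.Chars.splitOn m ['_'] = pvSp m := by
  have h := pv_go_spec (m.length + 1) m [] [] (by omega)
  rw [PySem.Chars.splitOn, h]
  simpa using pv_cons_headI_tail (pvSp_ne m)

lemma pv_intercalate_cons (p : List Char) (ps : List (List Char)) :
    List.intercalate ['_'] (p :: ps) = p ++ ps.flatMap (fun q => '_' :: q) := by
  induction ps generalizing p with
  | nil => simp [List.intercalate]
  | cons q qs ih =>
      have h2 : List.intercalate ['_'] (p :: q :: qs) = p ++ '_' :: List.intercalate ['_'] (q :: qs) := by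
        simp [List.intercalate, List.intersperse]
      rw [h2, ih]; simp
lemma pv_J (m : List Char) :
    List.intercalate ['_'] ((pvSp m).filter (fun p => !p.isEmpty)) = pvM m ∧
    (pvSp m).headI ++ (((pvSp m).tail).filter (fun p => !p.isEmpty)).flatMap (fun q => '_' :: q) = pvM' m := by
  induction m with
  | nil => simp [pvSp, pvM, pvM', List.intercalate]
  | cons c t ih =>
    obtain ⟨ih1, ih2⟩ := ih
    by_cases hc : c = '_'
    · subst hc
      constructor
      · simpa [pvSp, pvM] using ih1
      · -- headI of ([] :: pvSp t) = [], tail = pvSp t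
        have hu : pvSp ('_' :: t) = [] :: pvSp t := by simp [pvSp]
        rw [hu]
        simp only [List.headI, List.tail, pvM', List.nil_append]
        -- goal: (pvSp t).filter … |>.flatMap ('_'::·) = match pvM t with …
        cases hf : (pvSp t).filter (fun p => !p.isEmpty) with
        | nil =>
            have : pvM t = [] := by rw [← ih1, hf]; simp [List.intercalate]
            simp [this]
        | cons p ps =>
            have hp : p ≠ [] := by
              have := List.of_mem_filter (a := p) (by rw [hf]; exact List.mem_cons_self)
              simpa using this
            have hM : pvM t = p ++ ps.flatMap (fun q => '_' :: q) := by
              rw [← ih1, hf, pv_intercalate_cons]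
            have hMne : pvM t ≠ [] := by rw [hM]; simp [hp]
            rw [if_pos trivial]
            cases hMt : pvM t with
            | nil => exact absurd hMt hMne
            | cons d ds =>
                simp only [List.flatMap_cons, List.cons_append]
                rw [← hMt, ← hM]
    · -- c ≠ '_'
      cases hsp : pvSp t with
      | nil => exact absurd hsp (pvSp_ne t)
      | cons p ps =>
        have hsp' : pvSp (c :: t) = (c :: p) :: ps := by simp [pvSp, hc, hsp]
        have key : List.intercalate ['_'] (((c::p) :: ps).filter (fun p => !p.isEmpty)) = c :: pvM' t := by
          have : ((c::p) :: ps).filter (fun p => !p.isEmpty) = (c::p) :: ps.filter (fun p => !p.isEmpty) := by simp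
          rw [this, pv_intercalate_cons]
          have : c :: (p ++ (ps.filter (fun p => !p.isEmpty)).flatMap (fun q => '_' :: q)) = c :: pvM' t := by
            rw [← ih2, hsp]; simp
          simpa using this
        constructor
        · rw [hsp', key]; simp [pvM, hc]
        · rw [hsp']
          simp only [List.headI, List.tail]
          have : pvM' (c :: t) = c :: pvM' t := by simp [pvM', hc]
          rw [this, ← key]
          have : ((c::p) :: ps).filter (fun p => !p.isEmpty) = (c::p) :: ps.filter (fun p => !p.isEmpty) := by simp
          rw [this, pv_intercalate_cons]

lemma pv_foldl_G (cs : List Char) : ∀ acc : List Char,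
    cs.foldl (fun acc ch =>
      if PySem.Chars.isalnum ch then acc ++ [ch]
      else if acc ≠ [] ∧ PySem.List.pyGet? acc (-1) ≠ some '_' then acc ++ ['_'] else acc) acc
      = acc ++ pvG (acc.getLastD '_' != '_') cs := by
  induction cs with
  | nil => intro acc; simp [pvG]
  | cons c t ih =>
    intro acc
    rw [List.foldl_cons]
    by_cases h : PySem.Chars.isalnum c = true
    · rw [if_pos h, ih]
      have hs : ((acc ++ [c]).getLastD '_' != '_') = true := by
        simp; exact pv_alnum_ne c h
      rw [hs]
      simp [pvG, h]
    · rw [if_neg h]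
      by_cases hcond : acc ≠ [] ∧ PySem.List.pyGet? acc (-1) ≠ some '_'
      · rw [if_pos hcond, ih]
        have hsacc : (acc.getLastD '_' != '_') = true := by
          obtain ⟨h1, h2⟩ := hcond
          rw [pv_pyGet_neg_one] at h2
          cases hl : acc.getLast? with
          | none => exact absurd (List.getLast?_eq_none_iff.mp hl) h1
          | some d =>
              rw [List.getLastD_eq_getLast?, hl]
              simpa using fun he => h2 (by rw [hl, he])
        have hs2 : ((acc ++ ['_']).getLastD '_' != '_') = false := by simp
        rw [hs2, hsacc]
        simp [pvG, h]
      · rw [if_neg hcond, ih]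
        have hsacc : (acc.getLastD '_' != '_') = false := by
          rcases not_and_or.mp hcond with h1 | h2
          · have : acc = [] := not_not.mp h1
            subst this; rfl
          · have h2' : PySem.List.pyGet? acc (-1) = some '_' := not_not.mp h2
            rw [pv_pyGet_neg_one] at h2'
            rw [List.getLastD_eq_getLast?, h2']
            simp
        rw [hsacc]
        simp [pvG, h]

lemma pv_stripT_cons {r : List Char} (c : Char) (h : r ≠ []) :
    pvStripT (c :: r) = c :: pvStripT r := by
  unfold pvStripT
  have h1 : (c :: r).getLast? = r.getLast? := by
    cases r with
    | nil => exact absurd rfl h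
    | cons a t => simp [List.getLast?_cons_cons]
  rw [h1]
  split
  · rw [List.dropLast_cons_of_ne_nil h]
  · rfl

lemma pvG_true_nil (t : List Char) : pvG true t = [] ↔ t = [] := by
  cases t with
  | nil => simp [pvG]
  | cons c r => simp only [pvG]; split <;> simp

lemma pvG_false_nil (t : List Char) : pvG false t = [] ↔ pvM (t.map pvMapC) = [] := by
  induction t with
  | nil => simp [pvG, pvM]
  | cons c r ih =>
      by_cases h : PySem.Chars.isalnum c = true
      · have hc : c ≠ '_' := pv_alnum_ne c h
        simp [pvG, pvM, pvMapC, h, hc]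
      · simp [pvG, pvM, pvMapC, h, ih]

lemma pv_strip_G (cs : List Char) :
    pvStripT (pvG false cs) = pvM (cs.map pvMapC) ∧
    pvStripT (pvG true cs) = pvM' (cs.map pvMapC) := by
  induction cs with
  | nil => simp [pvG, pvM, pvM', pvStripT]
  | cons c t ih =>
    obtain ⟨ih1, ih2⟩ := ih
    by_cases h : PySem.Chars.isalnum c = true
    · have hc : c ≠ '_' := pv_alnum_ne c h
      have hG : ∀ s, pvG s (c :: t) = c :: pvG true t := by intro s; simp [pvG, h]
      have hM1 : pvM ((c :: t).map pvMapC) = c :: pvM' (t.map pvMapC) := by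
        simp [pvMapC, h, pvM, hc]
      have hM2 : pvM' ((c :: t).map pvMapC) = c :: pvM' (t.map pvMapC) := by
        simp [pvMapC, h, pvM', hc]
      have key : pvStripT (c :: pvG true t) = c :: pvM' (t.map pvMapC) := by
        by_cases hnil : pvG true t = []
        · have ht : t = [] := (pvG_true_nil t).mp hnil
          subst ht
          simp [hnil, pvStripT, hc, pvM']
        · rw [pv_stripT_cons c hnil, ih2]
      constructor
      · rw [hG, key, hM1]
      · rw [hG, key, hM2]
    · have hMskip : pvM ((c :: t).map pvMapC) = pvM (t.map pvMapC) := by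
        simp [pvMapC, h, pvM]
      constructor
      · rw [hMskip, ← ih1]
        have : pvG false (c :: t) = pvG false t := by simp [pvG, h]
        rw [this]
      · have hG : pvG true (c :: t) = '_' :: pvG false t := by simp [pvG, h]
        have hM' : pvM' ((c :: t).map pvMapC) =
            (match pvM (t.map pvMapC) with | [] => [] | r => '_' :: r) := by
          simp [pvMapC, h, pvM']
        rw [hG, hM']
        by_cases hnil : pvG false t = []
        · have hMt : pvM (t.map pvMapC) = [] := (pvG_false_nil t).mp hnil
          rw [hnil, hMt]
          simp [pvStripT]
        · have hMt : pvM (t.map pvMapC) ≠ [] := fun hh => hnil ((pvG_false_nil t).mpr hh)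
          rw [pv_stripT_cons '_' hnil, ih1]
          cases hMm : pvM (t.map pvMapC) with
          | nil => exact absurd hMm hMt
          | cons d ds => rfl

-- ===== VERDICT (by name: the statement is the Claim_ definition above) =====
theorem tool_token_py_spec : Claim_equal_tool_token_py := by
  intro value _
  unfold Spec_tool_token_py tool_token_py tool_token_py_alt
  have main : ∀ cs : List Char,
      PySem.Chars.join ['_']
        ((PySem.Chars.splitOn (cs.map (fun ch => if PySem.Chars.isalnum ch then ch else '_')) ['_']).filter
          (fun p => !p.isEmpty))
      = (let out := cs.foldl (fun acc ch =>
            if PySem.Chars.isalnum ch then acc ++ [ch]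
            else if acc ≠ [] ∧ PySem.List.pyGet? acc (-1) ≠ some '_' then acc ++ ['_'] else acc) [];
         if out ≠ [] ∧ PySem.List.pyGet? out (-1) = some '_' then out.dropLast else out) := by
    intro cs
    have hmap : (fun ch => if PySem.Chars.isalnum ch then ch else '_') = pvMapC := rfl
    have lhs : PySem.Chars.join ['_']
        ((PySem.Chars.splitOn (cs.map (fun ch => if PySem.Chars.isalnum ch then ch else '_')) ['_']).filter
          (fun p => !p.isEmpty)) = pvM (cs.map pvMapC) := by
      rw [hmap, pv_splitOn_eq]
      exact (pv_J (cs.map pvMapC)).1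
    have rhs1 : cs.foldl (fun acc ch =>
            if PySem.Chars.isalnum ch then acc ++ [ch]
            else if acc ≠ [] ∧ PySem.List.pyGet? acc (-1) ≠ some '_' then acc ++ ['_'] else acc) []
        = pvG false cs := by
      simpa using pv_foldl_G cs []
    have rhs2 : ∀ l : List Char,
        (if l ≠ [] ∧ PySem.List.pyGet? l (-1) = some '_' then l.dropLast else l) = pvStripT l := by
      intro l
      unfold pvStripT
      rw [pv_pyGet_neg_one]
      cases l with
      | nil => simp
      | cons a t => simp
    show _ = (if _ then _ else _)
    rw [lhs, rhs1, rhs2, (pv_strip_G cs).1]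
  simp only [main]
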